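-- pv_equiv track=rewrite | github.com/Shubhamkumarjha1244/DSA_PYTHON | DSA-using_python/Dynamic Programming/No_way_change_iterrative.py | change_irr
-- ===== SOURCE A (Python) =====
-- def change_irr(domination,value):
--     dp=[i for i in range(value+1)]
--     domination.sort()
--     dp[0]=0
--     for i in range(1,value+1):
--         ways=0
--         for ele in domination:
--             if i-ele>=0:ways+=(1+dp[i-ele])
--         dp[i]=ways
--     return dp[value]
-- ===== SOURCE B (Python) =====
-- def change_irr(domination, value):
--     # Different DP: count coin sequences with EXACT sum j (comp[j]), accumulating
--     # a running total, instead of A's direct "weighted ways" table.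
--     # Note: like A, this sorts `domination` in place (observable side effect).
--     domination.sort()
--     comp = [1]          # comp[j] = number of nonempty-or-empty coin sequences with sum exactly j
--     total = 0
--     for i in range(1, value + 1):
--         ci = 0
--         for ele in domination:
--             if ele <= i:
--                 ci += comp[i - ele]
--         comp.append(ci)
--         total += ci
--     return total
-- ===== Notes on version B (the rewrite author's own statement) =====
-- stated objective: alternative
-- what changed: B replaces A's table of weighted ways-values dp[i] = sum(1+dp[i-ele]) with a different DP: a table comp[j] counting coin sequences of exact sum j plus a running total of comp[1..i], returning the total; agreement rests on a telescoping/summation-exchange identity.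
-- outside the precondition, e.g. on change_irr([0], 1): A returns 2, B raises IndexError; on change_irr([-2], 3): A raises IndexError, B raises IndexError
import Mathlib
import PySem

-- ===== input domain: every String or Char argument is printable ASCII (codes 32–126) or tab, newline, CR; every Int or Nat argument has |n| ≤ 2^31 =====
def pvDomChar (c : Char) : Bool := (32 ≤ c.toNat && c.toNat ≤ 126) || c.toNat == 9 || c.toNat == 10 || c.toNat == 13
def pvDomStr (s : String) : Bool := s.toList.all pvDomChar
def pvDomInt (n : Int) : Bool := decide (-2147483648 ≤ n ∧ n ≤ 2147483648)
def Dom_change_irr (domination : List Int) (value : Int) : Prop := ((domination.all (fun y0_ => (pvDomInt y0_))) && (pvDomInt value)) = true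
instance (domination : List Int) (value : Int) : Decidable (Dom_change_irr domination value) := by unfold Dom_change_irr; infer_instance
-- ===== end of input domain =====

-- B replaces A's "weighted ways" table with an exact-sum composition-count table plus a
-- running total (alternative decomposition, same cost). Both A and B sort `domination`
-- in place in Python; the theorems below are about the RETURN value only.

-- ===== PORT A =====
-- inner loop of A: ways = 0; for ele in dom: if i-ele>=0: ways += 1 + dp[i-ele]
def waysA (dom dp : List Int) (i : Int) : Int :=
  dom.foldl (fun w ele => if i - ele ≥ 0 then w + (1 + PySem.List.pyGetD dp (i - ele) 0) else w) 0

def change_irr (domination : List Int) (value : Int) : Int :=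
  let dp0 := PySem.List.pyRange 0 (value + 1) 1          -- dp = [i for i in range(value+1)]
  let dom := PySem.List.sorted domination id false        -- domination.sort()
  let dp1 := PySem.List.pySetD dp0 0 0                    -- dp[0] = 0  (raises iff value < 0; excluded by Pre_)
  let dp := (PySem.List.pyRange 1 (value + 1) 1).foldl
      (fun dp i => PySem.List.pySetD dp i (waysA dom dp i)) dp1
  PySem.List.pyGetD dp value 0                            -- return dp[value]

-- ===== PORT B =====
-- inner loop of B: ci = 0; for ele in dom: if ele <= i: ci += comp[i-ele]
def compStep (dom prev : List Int) (i : Int) : Int :=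
  dom.foldl (fun w ele => if ele ≤ i then w + PySem.List.pyGetD prev (i - ele) 0 else w) 0

def change_irr_alt (domination : List Int) (value : Int) : Int :=
  let dom := PySem.List.sorted domination id false        -- domination.sort()
  let st := (PySem.List.pyRange 1 (value + 1) 1).foldl
      (fun (st : List Int × Int) i =>
        let ci := compStep dom st.1 i
        (st.1 ++ [ci], st.2 + ci)) ([1], 0)
  st.2

-- ===== PRECONDITION & SPEC =====
-- Pre_ excludes value < 0 (A raises IndexError on dp[0]=0) and, when value ≥ 1, coins ≤ 0:
-- a negative coin makes A raise IndexError (dp[i-ele] past the end), and on a zero coin A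
-- returns a value read from the not-yet-overwritten initializer entry dp[i]=i, where B's
-- natural exact-sum table has no entry yet and raises IndexError.
def Pre_change_irr (domination : List Int) (value : Int) : Prop :=
  0 ≤ value ∧ (value = 0 ∨ ∀ ele ∈ domination, 1 ≤ ele)
instance (domination : List Int) (value : Int) : Decidable (Pre_change_irr domination value) := by
  unfold Pre_change_irr; infer_instance

def pvWitness_change_irr : List Int × Int := ([2, 1, 3], 6)

def Spec_change_irr (domination : List Int) (value : Int) (out : Int) : Prop := out = change_irr_alt domination value
instance (domination : List Int) (value : Int) (out : Int) : Decidable (Spec_change_irr domination value out) := by unfold Spec_change_irr; infer_instance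

-- ===== CLAIM (what is proved, stated in full; the proofs are below) =====
def Claim_equal_change_irr : Prop := ∀ (domination : List Int) (value : Int), Dom_change_irr domination value → Pre_change_irr domination value → Spec_change_irr domination value (change_irr domination value)

-- ===== LEMMAS AND PROOFS =====

-- getD / getElem toolbox
lemma getD_append_left' (l m : List Int) (j : Nat) (h : j < l.length) :
    (l ++ m).getD j 0 = l.getD j 0 := by
  simp [List.getD_eq_getElem?_getD, List.getElem?_append_left h]

lemma getD_append_last (l : List Int) (x : Int) : (l ++ [x]).getD l.length 0 = x := by
  simp [List.getD_eq_getElem?_getD]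

lemma getElem_eq_getD' (l : List Int) (j : Nat) (h : j < l.length) : l[j]'h = l.getD j 0 := by
  rw [List.getD_eq_getElem?_getD, List.getElem?_eq_getElem h]; rfl

-- comp table after k iterations of B's loop, and its entries
def compList (dom : List Int) : Nat → List Int
  | 0 => [1]
  | k + 1 => compList dom k ++ [compStep dom (compList dom k) ((k : Int) + 1)]

def cval (dom : List Int) (j : Nat) : Int := (compList dom j).getD j 0

-- running total S k = Σ_{m=1..k} cval m  (= A's dp[k])
def sval (dom : List Int) (k : Nat) : Int := ((List.range k).map (fun m => cval dom (m + 1))).sum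

lemma length_compList (dom : List Int) (k : Nat) : (compList dom k).length = k + 1 := by
  induction k with
  | zero => rfl
  | succ k ih => simp [compList, ih]

lemma cval_eq_compStep (dom : List Int) (k : Nat) :
    cval dom (k + 1) = compStep dom (compList dom k) ((k : Int) + 1) := by
  rw [cval, compList]
  have h := length_compList dom k
  calc (compList dom k ++ [compStep dom (compList dom k) ((k : Int) + 1)]).getD (k + 1) 0
      = (compList dom k ++ [compStep dom (compList dom k) ((k : Int) + 1)]).getD
          (compList dom k).length 0 := by rw [h]
    _ = _ := getD_append_last _ _

lemma compList_getD (dom : List Int) {j k : Nat} (h : j ≤ k) :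
    (compList dom k).getD j 0 = cval dom j := by
  induction k with
  | zero => interval_cases j; rfl
  | succ k ih =>
    rcases Nat.lt_or_ge j (k + 1) with hj | hj
    · rw [compList, getD_append_left' _ _ _ (by rw [length_compList]; omega)]
      exact ih (by omega)
    · have : j = k + 1 := by omega
      subst this; rfl

lemma sval_succ (dom : List Int) (k : Nat) :
    sval dom (k + 1) = sval dom k + cval dom (k + 1) := by
  simp [sval, List.range_succ]

-- a guarded accumulating foldl is a sum over the list
lemma foldl_guard_sum (l : List Int) (p : Int → Prop) [DecidablePred p] (f : Int → Int) :
    ∀ acc : Int, l.foldl (fun w e => if p e then w + f e else w) acc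
      = acc + (l.map (fun e => if p e then f e else 0)).sum := by
  induction l with
  | nil => intro acc; simp
  | cons x l ih =>
    intro acc
    simp only [List.foldl_cons, List.map_cons, List.sum_cons, ih]
    split <;> ring

lemma sum_map_congr_mem (l : List Int) (f g : Int → Int) (h : ∀ e ∈ l, f e = g e) :
    (l.map f).sum = (l.map g).sum := by
  induction l with
  | nil => rfl
  | cons x l ih =>
    simp only [List.map_cons, List.sum_cons, h x (by simp), ih (fun e he => h e (by simp [he]))]

lemma sum_map_add (l : List Int) (f g : Int → Int) :
    (l.map (fun e => f e + g e)).sum = (l.map f).sum + (l.map g).sum := by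
  induction l with
  | nil => rfl
  | cons x l ih => simp only [List.map_cons, List.sum_cons, ih]; ring

-- compStep on the true comp table computes the next entry as a sum of cval's
lemma compStep_eq_sum (dom : List Int) (hd : ∀ e ∈ dom, 1 ≤ e) (k : Nat) :
    compStep dom (compList dom k) ((k : Int) + 1)
      = (dom.map (fun e => if e ≤ (k : Int) + 1 then cval dom (((k : Int) + 1 - e)).toNat else 0)).sum := by
  rw [compStep, foldl_guard_sum, zero_add]
  apply sum_map_congr_mem
  intro e he
  by_cases h : e ≤ (k : Int) + 1
  · simp only [if_pos h]
    have h1 := hd e he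
    have hnn : (0 : Int) ≤ (k : Int) + 1 - e := by omega
    have hlt : (k : Int) + 1 - e < ((compList dom k).length : Int) := by
      rw [length_compList]; push_cast; omega
    rw [PySem.List.pyGetD_eq_getElem _ _ hnn hlt, getElem_eq_getD']
    exact compList_getD dom (by omega)
  · simp [h]

-- THE KEY IDENTITY: A's inner sum of (1 + dp[i-e]) telescopes to S i
lemma ways_sum_eq (dom : List Int) (hd : ∀ e ∈ dom, 1 ≤ e) :
    ∀ i : Nat, (dom.map (fun e => if e ≤ (i : Int) then 1 + sval dom (((i : Int) - e)).toNat else 0)).sum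
      = sval dom i := by
  intro i
  induction i with
  | zero =>
    simp only [Nat.cast_zero]
    have : ∀ e ∈ dom, (if e ≤ (0 : Int) then 1 + sval dom ((0 - e)).toNat else 0) = 0 := by
      intro e he; have := hd e he; rw [if_neg (by omega)]
    rw [sum_map_congr_mem _ _ (fun _ => 0) this]; simp [sval]
  | succ i ih =>
    rw [sval_succ, ← ih, cval_eq_compStep, compStep_eq_sum dom hd i, ← sum_map_add]
    apply sum_map_congr_mem
    intro e he
    have h1 := hd e he
    by_cases h : e ≤ (i : Int)
    · have e1 : (((i : Int) + 1 - e)).toNat = ((i : Int) - e).toNat + 1 := by omega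
      push_cast
      rw [if_pos (by omega), if_pos (by omega), if_pos (by omega), e1, sval_succ]
      ring
    · by_cases h2 : e ≤ (i : Int) + 1
      · push_cast
        rw [if_pos (by omega), if_neg (by omega), if_pos (by omega)]
        have e0 : (((i : Int) + 1 - e)).toNat = 0 := by omega
        rw [e0]
        show 1 + sval dom 0 = 0 + cval dom 0
        simp [sval, cval, compList]
      · push_cast
        rw [if_neg (by omega), if_neg (by omega), if_neg (by omega)]
        simp

-- B's loop state after n iterations
lemma alt_loop_eq (dom : List Int) (n : Nat) :
    (PySem.List.pyRange 1 ((n : Int) + 1) 1).foldl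
      (fun (st : List Int × Int) i =>
        let ci := compStep dom st.1 i
        (st.1 ++ [ci], st.2 + ci)) ([1], 0)
    = (compList dom n, sval dom n) := by
  induction n with
  | zero => simp [PySem.List.pyRange_one_eq_nil, compList, sval]
  | succ n ih =>
    have hsplit : PySem.List.pyRange 1 ((↑(n + 1) : Int) + 1) 1
        = PySem.List.pyRange 1 ((n : Int) + 1) 1 ++ [(n : Int) + 1] := by
      push_cast
      exact PySem.List.pyRange_one_succ_right (by omega)
    rw [hsplit, List.foldl_append, ih]
    simp only [List.foldl_cons, List.foldl_nil]
    rw [compList, sval_succ, cval_eq_compStep]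

-- A's dp list after k of n iterations: computed prefix ++ untouched initializer tail
def dpState (dom : List Int) (n k : Nat) : List Int :=
  (List.range (k + 1)).map (fun j => sval dom j) ++ PySem.List.pyRange ((k : Int) + 1) ((n : Int) + 1) 1

lemma length_dpState (dom : List Int) {n k : Nat} (h : k ≤ n) :
    (dpState dom n k).length = n + 1 := by
  simp [dpState, PySem.List.length_pyRange_one]; omega

lemma dpState_getD (dom : List Int) {n k j : Nat} (hk : k ≤ n) (hj : j ≤ k) :
    (dpState dom n k).getD j 0 = sval dom j := by
  rw [dpState, getD_append_left' _ _ _ (by simp; omega)]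
  simp [List.getD_eq_getElem?_getD, Nat.lt_succ_of_le hj]

lemma waysA_dpState (dom : List Int) (hd : ∀ e ∈ dom, 1 ≤ e) {n k : Nat} (hk : k + 1 ≤ n) :
    waysA dom (dpState dom n k) ((k : Int) + 1) = sval dom (k + 1) := by
  rw [waysA, foldl_guard_sum, zero_add]
  have hgoal := ways_sum_eq dom hd (k + 1)
  rw [← hgoal]
  apply sum_map_congr_mem
  intro e he
  have h1 := hd e he
  by_cases h : e ≤ (k : Int) + 1
  · rw [if_pos (by omega), if_pos (by push_cast; omega)]
    have hxc : ((k + 1 : Nat) : Int) = (k : Int) + 1 := by push_cast; ring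
    rw [hxc]
    congr 1
    have hnn : (0 : Int) ≤ (k : Int) + 1 - e := by omega
    have hlt : (k : Int) + 1 - e < ((dpState dom n k).length : Int) := by
      rw [length_dpState dom (by omega)]; push_cast; omega
    rw [PySem.List.pyGetD_eq_getElem _ _ hnn hlt, getElem_eq_getD']
    exact dpState_getD dom (by omega) (by omega)
  · rw [if_neg (by omega), if_neg (by push_cast; omega)]

lemma dpState_set (dom : List Int) {n k : Nat} (hkn : k + 1 ≤ n) :
    dpState dom n (k + 1) = (dpState dom n k).set (k + 1) (sval dom (k + 1)) := by
  have h1 : (dpState dom n k).length = n + 1 := length_dpState dom (by omega)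
  have h2 : (dpState dom n (k + 1)).length = n + 1 := length_dpState dom hkn
  apply List.ext_getElem
  · rw [h2, List.length_set, h1]
  · intro j hj hj'
    rw [h2] at hj
    rw [List.getElem_set]
    by_cases hje : k + 1 = j
    · subst hje
      rw [if_pos rfl, getElem_eq_getD', dpState_getD dom hkn (le_refl _)]
    · rw [if_neg hje]
      rcases Nat.lt_or_ge j (k + 1) with hjk | hjk
      · rw [getElem_eq_getD', getElem_eq_getD',
          dpState_getD dom hkn (by omega), dpState_getD dom (by omega) (by omega)]
      · simp only [dpState]
        rw [List.getElem_append_right (by simp; omega), List.getElem_append_right (by simp; omega)]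
        rw [PySem.List.getElem_pyRange_one, PySem.List.getElem_pyRange_one]
        simp only [List.length_map, List.length_range]
        push_cast
        omega

lemma a_loop_eq (dom : List Int) (hd : ∀ e ∈ dom, 1 ≤ e) (n : Nat) :
    ∀ k, k ≤ n → (PySem.List.pyRange 1 ((k : Int) + 1) 1).foldl
      (fun dp i => PySem.List.pySetD dp i (waysA dom dp i)) (dpState dom n 0)
    = dpState dom n k := by
  intro k
  induction k with
  | zero => intro _; simp [PySem.List.pyRange_one_eq_nil]
  | succ k ih =>
    intro hkn
    have hsplit : PySem.List.pyRange 1 ((↑(k + 1) : Int) + 1) 1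
        = PySem.List.pyRange 1 ((k : Int) + 1) 1 ++ [(k : Int) + 1] := by
      push_cast
      exact PySem.List.pyRange_one_succ_right (by omega)
    rw [hsplit, List.foldl_append, ih (by omega)]
    simp only [List.foldl_cons, List.foldl_nil]
    rw [waysA_dpState dom hd hkn]
    have hc : ((k : Int) + 1) = ((k + 1 : Nat) : Int) := by push_cast; ring
    rw [hc, PySem.List.pySetD_natCast]
    exact (dpState_set dom hkn).symm

-- ===== VERDICT (by name: the statement is the Claim_ definition above) =====
theorem change_irr_spec : Claim_equal_change_irr := by
  intro domination value _ hpre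
  obtain ⟨hv, hcase⟩ := hpre
  rcases hcase with hz | hcoins
  · subst hz
    have h1 : PySem.List.pyRange 1 ((0 : Int) + 1) 1 = [] := PySem.List.pyRange_one_eq_nil (by omega)
    simp only [Spec_change_irr, change_irr, change_irr_alt, h1, List.foldl_nil]
    decide
  · obtain ⟨n, rfl⟩ : ∃ n : Nat, value = (n : Int) := ⟨value.toNat, (Int.toNat_of_nonneg hv).symm⟩
    have hd : ∀ e ∈ PySem.List.sorted domination id false, 1 ≤ e := by
      intro e he
      exact hcoins e ((PySem.List.mem_sorted domination id false e).1 he)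
    simp only [Spec_change_irr, change_irr, change_irr_alt]
    rw [alt_loop_eq (PySem.List.sorted domination id false) n]
    have hinit : PySem.List.pySetD (PySem.List.pyRange 0 ((n : Int) + 1) 1) 0 0
        = dpState (PySem.List.sorted domination id false) n 0 := by
      rw [PySem.List.pyRange_one_cons (by omega), PySem.List.pySetD_of_nonneg _ _ (by omega)]
      simp [dpState, sval]
    rw [hinit, a_loop_eq (PySem.List.sorted domination id false) hd n n (le_refl n)]
    have hnn : (0 : Int) ≤ (n : Int) := by omega
    have hlt : ((n : Int)) < ((dpState (PySem.List.sorted domination id false) n n).length : Int) := by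
      rw [length_dpState _ (le_refl n)]; push_cast; omega
    rw [PySem.List.pyGetD_eq_getElem _ _ hnn hlt, getElem_eq_getD']
    have : ((n : Int)).toNat = n := by omega
    rw [this, dpState_getD _ (le_refl n) (le_refl n)]
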